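-- pv_equiv track=rewrite | github.com/skchow03/icr2tools | icr2_core/trk/trk_utils.py | color_from_ground_type
-- ===== SOURCE A (Python) =====
-- def color_from_ground_type(ground):
--     """Return a display colour name for a TRK ground type."""
--
--     mapping = {
--         (0, 2, 4, 6): "#2e7d32",  # Grass
--         (8, 10, 12, 14): "#d8c091",  # Dry grass
--         (16, 18, 20, 22): "#8d6e63",  # Dirt
--         (24, 26, 28, 30): "#c9a26b",  # Sand
--         (32, 34, 36, 38): "#b0b0b0",  # Concrete
--         (40, 42, 44, 46): "#9e9e9e",  # Asphalt
--         (48, 50, 52, 54): "#ffffff",  # Paint / curbing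
--     }
--     for values, color in mapping.items():
--         if ground in values:
--             return color
--     return "#808080"
-- ===== SOURCE B (Python) =====
-- def color_from_ground_type(ground):
--     """Return a display colour name for a TRK ground type."""
--
--     colors = ("#2e7d32", "#d8c091", "#8d6e63", "#c9a26b",
--               "#b0b0b0", "#9e9e9e", "#ffffff")
--     if 0 <= ground <= 54 and ground % 2 == 0:
--         return colors[ground // 8]
--     return "#808080"
-- ===== Notes on version B (the rewrite author's own statement) =====
-- stated objective: simpler
-- what changed: Replaces the scan over a dict mapping tuples of codes to colors with a closed-form arithmetic index: valid codes are exactly the even integers from zero through fifty-four, and the color is looked up at index ground // 8 in a fixed color list.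
import Mathlib
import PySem

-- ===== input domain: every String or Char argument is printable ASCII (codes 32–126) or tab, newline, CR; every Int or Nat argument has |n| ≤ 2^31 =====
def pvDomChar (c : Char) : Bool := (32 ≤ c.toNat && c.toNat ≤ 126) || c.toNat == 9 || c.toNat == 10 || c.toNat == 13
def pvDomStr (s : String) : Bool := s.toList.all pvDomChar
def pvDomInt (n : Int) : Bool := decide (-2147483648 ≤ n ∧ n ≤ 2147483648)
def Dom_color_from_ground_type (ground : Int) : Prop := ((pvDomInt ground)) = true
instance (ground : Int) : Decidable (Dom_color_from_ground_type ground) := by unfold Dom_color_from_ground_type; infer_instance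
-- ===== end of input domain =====

-- ===== PORT A =====
-- A scans a dict mapping 4-tuples of codes to colors; B computes the color by a closed-form
-- arithmetic index (even 0..54 -> colors[ground // 8]): simpler, no scan.
def cfgtGo (ground : Int) : List (List Int × String) → String
  | [] => "#808080"
  | (values, color) :: rest => if ground ∈ values then color else cfgtGo ground rest

def color_from_ground_type (ground : Int) : String :=
  let mapping : List (List Int × String) :=
    [([0, 2, 4, 6], "#2e7d32"),
     ([8, 10, 12, 14], "#d8c091"),
     ([16, 18, 20, 22], "#8d6e63"),
     ([24, 26, 28, 30], "#c9a26b"),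
     ([32, 34, 36, 38], "#b0b0b0"),
     ([40, 42, 44, 46], "#9e9e9e"),
     ([48, 50, 52, 54], "#ffffff")]
  cfgtGo ground mapping

-- ===== PORT B =====
def color_from_ground_type_alt (ground : Int) : String :=
  let colors : List String :=
    ["#2e7d32", "#d8c091", "#8d6e63", "#c9a26b", "#b0b0b0", "#9e9e9e", "#ffffff"]
  if 0 ≤ ground ∧ ground ≤ 54 ∧ PySem.Int.mod ground 2 = 0 then
    (PySem.List.pyGet? colors (PySem.Int.floordiv ground 8)).getD "#808080"
  else "#808080"

-- ===== PRECONDITION & SPEC =====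
def Spec_color_from_ground_type (ground : Int) (out : String) : Prop := out = color_from_ground_type_alt ground
instance (ground : Int) (out : String) : Decidable (Spec_color_from_ground_type ground out) := by unfold Spec_color_from_ground_type; infer_instance

-- ===== CLAIM (what is proved, stated in full; the proofs are below) =====
def Claim_equal_color_from_ground_type : Prop := ∀ (ground : Int), Dom_color_from_ground_type ground → Spec_color_from_ground_type ground (color_from_ground_type ground)

-- ===== LEMMAS AND PROOFS =====

-- ===== VERDICT (by name: the statement is the Claim_ definition above) =====
theorem color_from_ground_type_spec : Claim_equal_color_from_ground_type := by
  intro ground _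
  unfold Spec_color_from_ground_type
  by_cases h : 0 ≤ ground ∧ ground ≤ 54
  · obtain ⟨h1, h2⟩ := h
    interval_cases ground <;> rfl
  · have hA : color_from_ground_type ground = "#808080" := by
      simp only [color_from_ground_type, cfgtGo, List.mem_cons, List.not_mem_nil, or_false]
      split_ifs <;> first | rfl | (exfalso; omega)
    have hB : color_from_ground_type_alt ground = "#808080" := by
      simp only [color_from_ground_type_alt]
      split_ifs with hc
      · exact absurd ⟨hc.1, hc.2.1⟩ h
      · rfl
    rw [hA, hB]
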